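-- pv_equiv track=rewrite | github.com/august0-m/IP-Guias_y_parciales | python/nuevoArranque.py | filas_ordenadas
-- ===== SOURCE A (Python) =====
-- def ordena_2(s:list)->bool:
--     res:bool= False
--     for i in range(0,len(s)-1,1):
--         if s[i]<s[i+1]:
--             res=True
--     return res
--
-- def filas_ordenadas(matriz:[[int]])->list:
--     lista_vuleana_xd:list=[]
--     for i in range(len(matriz)):
--             if ordena_2(matriz[i]):
--                 lista_vuleana_xd.append(True)
--             else:
--                 lista_vuleana_xd.append(False)
--     return lista_vuleana_xd
-- ===== SOURCE B (Python) =====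
-- def filas_ordenadas(matriz):
--     return [fila != sorted(fila, reverse=True) for fila in matriz]
-- ===== Notes on version B (the rewrite author's own statement) =====
-- stated objective: idiomatic
-- what changed: Replaces the per-element adjacent index scan with the standard 'row != sorted(row, reverse=True)' idiom in a single list comprehension: a row has a strictly increasing adjacent pair iff it is not already non-increasing.
import Mathlib
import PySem

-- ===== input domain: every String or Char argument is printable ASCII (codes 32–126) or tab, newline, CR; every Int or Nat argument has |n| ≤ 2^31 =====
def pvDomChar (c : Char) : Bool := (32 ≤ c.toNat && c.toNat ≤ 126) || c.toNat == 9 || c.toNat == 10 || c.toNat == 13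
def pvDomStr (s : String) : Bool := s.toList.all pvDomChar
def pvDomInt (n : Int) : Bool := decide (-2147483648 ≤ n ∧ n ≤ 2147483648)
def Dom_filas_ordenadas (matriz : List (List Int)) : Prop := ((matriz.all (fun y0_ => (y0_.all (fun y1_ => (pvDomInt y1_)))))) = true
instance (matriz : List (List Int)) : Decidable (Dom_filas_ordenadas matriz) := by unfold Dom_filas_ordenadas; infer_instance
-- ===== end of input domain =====

-- B replaces A's per-element adjacent index scan with the idiomatic
-- 'row != sorted(row, reverse=True)' test, one comprehension over the rows (same result, no speed claim).

-- ===== PORT A =====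
-- indices i and i+1 drawn from range(0, len(s)-1) are always in range, so pyGetD is exact here
def ordena2 (s : List Int) : Bool :=
  (PySem.List.pyRange 0 (PySem.List.len s - 1) 1).foldl
    (fun res i => if PySem.List.pyGetD s i 0 < PySem.List.pyGetD s (i + 1) 0 then true else res)
    false

def filas_ordenadas (matriz : List (List Int)) : List Bool :=
  (PySem.List.pyRange 0 (PySem.List.len matriz) 1).foldl
    (fun acc i => acc ++ [if ordena2 (PySem.List.pyGetD matriz i []) then true else false])
    []

-- ===== PORT B =====
def filas_ordenadas_alt (matriz : List (List Int)) : List Bool :=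
  matriz.map (fun fila => decide (fila ≠ PySem.List.sorted fila (fun x => x) true))

-- ===== PRECONDITION & SPEC =====
def Spec_filas_ordenadas (matriz : List (List Int)) (out : List Bool) : Prop := out = filas_ordenadas_alt matriz
instance (matriz : List (List Int)) (out : List Bool) : Decidable (Spec_filas_ordenadas matriz out) := by unfold Spec_filas_ordenadas; infer_instance

-- ===== CLAIM (what is proved, stated in full; the proofs are below) =====
def Claim_equal_filas_ordenadas : Prop := ∀ (matriz : List (List Int)), Dom_filas_ordenadas matriz → Spec_filas_ordenadas matriz (filas_ordenadas matriz)

-- ===== LEMMAS AND PROOFS =====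

-- A's loop 'res = True if cond' over a list of indices is an 'any'
theorem foldl_if_true_eq_any {α : Type} (p : α → Prop) [DecidablePred p] (l : List α) (b : Bool) :
    l.foldl (fun res i => if p i then true else res) b = (b || l.any (fun i => decide (p i))) := by
  induction l generalizing b with
  | nil => simp
  | cons x xs ih =>
      simp only [List.foldl_cons, List.any_cons, ih]
      by_cases h : p x <;> simp [h]

-- ordena_2 returns true iff some adjacent pair strictly increases
theorem ordena2_true_iff (s : List Int) :
    ordena2 s = true ↔ ∃ k : Nat, k + 1 < s.length ∧ s[k]! < s[k+1]! := by
  unfold ordena2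
  rw [foldl_if_true_eq_any]
  simp only [Bool.false_or, List.any_eq_true, decide_eq_true_eq, PySem.List.mem_pyRange_one]
  constructor
  · rintro ⟨i, ⟨h0, h1⟩, hlt⟩
    refine ⟨i.toNat, ?_, ?_⟩
    · simp [PySem.List.len_eq] at h1; omega
    · have hl : (i : Int) < s.length := by simp [PySem.List.len_eq] at h1; omega
      have hl' : (i + 1 : Int) < s.length := by simp [PySem.List.len_eq] at h1; omega
      rw [PySem.List.pyGetD_eq_getElem s 0 h0 hl, PySem.List.pyGetD_eq_getElem s 0 (by omega) hl'] at hlt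
      have ht : (i + 1).toNat = i.toNat + 1 := by omega
      simp only [ht] at hlt
      have hk1 : i.toNat < s.length := by omega
      have hk2 : i.toNat + 1 < s.length := by omega
      simpa [List.getElem!_eq_getElem?_getD, List.getElem?_eq_getElem, hk1, hk2] using hlt
  · rintro ⟨k, hk, hlt⟩
    refine ⟨(k : Int), ⟨by positivity, ?_⟩, ?_⟩
    · simp [PySem.List.len_eq]; omega
    · have hk1 : k < s.length := by omega
      rw [PySem.List.pyGetD_eq_getElem s 0 (by positivity) (by exact_mod_cast hk1),
          PySem.List.pyGetD_eq_getElem s 0 (by positivity) (by omega)]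
      have ht : ((k : Int) + 1).toNat = k + 1 := by omega
      simp only [Int.toNat_natCast, ht]
      simpa [List.getElem!_eq_getElem?_getD, List.getElem?_eq_getElem, hk1, hk] using hlt

-- a row equals its reverse-sorted version iff it is non-increasing
theorem sorted_rev_eq_iff (s : List Int) :
    PySem.List.sorted s (fun x => x) true = s ↔ List.Pairwise (fun a b : Int => b ≤ a) s := by
  constructor
  · intro h
    have := PySem.List.sorted_pairwise_rev s (fun x => x)
    rwa [h] at this
  · exact PySem.List.sorted_rev_eq_self_of_pairwise s (fun x => x)

-- per-row agreement of the two programs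
theorem ordena2_eq_alt (s : List Int) :
    ordena2 s = decide (s ≠ PySem.List.sorted s (fun x => x) true) := by
  by_cases h : ordena2 s = true
  · rw [h]
    rcases (ordena2_true_iff s).mp h with ⟨k, hk, hlt⟩
    symm
    simp only [decide_eq_true_eq]
    intro heq
    have hpw : List.Pairwise (fun a b : Int => b ≤ a) s := (sorted_rev_eq_iff s).mp heq.symm
    have hch : List.IsChain (fun a b : Int => b ≤ a) s := List.isChain_iff_pairwise.mpr hpw
    have := (List.isChain_iff_getElem).mp hch k hk
    have hk1 : k < s.length := by omega
    rw [List.getElem!_eq_getElem?_getD, List.getElem!_eq_getElem?_getD,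
        List.getElem?_eq_getElem hk1, List.getElem?_eq_getElem hk] at hlt
    simp at hlt
    omega
  · have hf : ordena2 s = false := by revert h; cases ordena2 s <;> simp
    rw [hf]
    symm
    simp only [decide_eq_false_iff_not, not_not]
    symm
    apply (sorted_rev_eq_iff s).mpr
    apply List.isChain_iff_pairwise.mp
    apply (List.isChain_iff_getElem).mpr
    intro i hi
    by_contra hlt
    apply h
    apply (ordena2_true_iff s).mpr
    refine ⟨i, hi, ?_⟩
    have hi1 : i < s.length := by omega
    rw [List.getElem!_eq_getElem?_getD, List.getElem!_eq_getElem?_getD,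
        List.getElem?_eq_getElem hi1, List.getElem?_eq_getElem hi]
    simp; omega

-- ===== VERDICT (by name: the statement is the Claim_ definition above) =====
theorem filas_ordenadas_spec : Claim_equal_filas_ordenadas := by
  intro matriz _
  unfold Spec_filas_ordenadas filas_ordenadas filas_ordenadas_alt
  rw [PySem.List.foldl_pyRange_zero_pyGetD matriz []
        (fun acc row => acc ++ [if ordena2 row then true else false]) [],
      PySem.List.foldl_append_singleton_eq_map (fun row => if ordena2 row then true else false) matriz []]
  simp only [List.nil_append]
  apply List.map_congr_left
  intro fila _
  rw [ordena2_eq_alt]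
  cases h : decide (fila ≠ PySem.List.sorted fila (fun x => x) true) <;> simp
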